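-- pv_equiv track=rewrite | github.com/arihkot/drishti | backend/services/vectorizer.py | renumber_labels
-- ===== SOURCE A (Python) =====
-- CATEGORY_LABELS: dict[str, str] = {
--     "plot": "Plot",
--     "road": "Road",
--     "boundary": "Boundary",
-- }
--
-- def renumber_labels(plots: list[dict]) -> list[dict]:
--     """Re-number plot labels sequentially per category.
--
--     After merge/clip steps remove some plots the original numbering has gaps
--     (e.g. Plot 1, Plot 4, Plot 23).  This assigns clean sequential numbers
--     (Plot 1, Plot 2, Plot 3…) while preserving category order.
--     """
--     counters: dict[str, int] = {}
--     for plot in plots: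
--         cat = plot.get("category", "plot")
--         counters[cat] = counters.get(cat, 0) + 1
--         cat_label = CATEGORY_LABELS.get(cat, cat.capitalize())
--         plot["label"] = f"{cat_label} {counters[cat]}"
--     return plots
-- ===== SOURCE B (Python) =====
-- CATEGORY_LABELS: dict[str, str] = {
--     "plot": "Plot",
--     "road": "Road",
--     "boundary": "Boundary",
-- }
--
-- def renumber_labels(plots: list[dict]) -> list[dict]:
--     """Re-number plot labels sequentially per category.
--
--     Group-then-number decomposition: first group plot indices by category
--     (dict preserves first-appearance order), then write labels one whole
--     category at a time, numbering each group 1..len(group).  Mutates the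
--     plot dicts in place like the original and returns the same list.
--     """
--     groups: dict[str, list[int]] = {}
--     for idx, plot in enumerate(plots):
--         groups.setdefault(plot.get("category", "plot"), []).append(idx)
--     for cat, idxs in groups.items():
--         base = CATEGORY_LABELS.get(cat, cat.capitalize())
--         for i, idx in enumerate(idxs):
--             plots[idx]["label"] = f"{base} {i + 1}"
--     return plots
-- ===== Notes on version B (the rewrite author's own statement) =====
-- stated objective: alternative
-- what changed: Replaces A's interleaved single pass with a per-category running counter dict by a two-stage group-then-number pass: first group plot indices by category into an ordered dict, then write labels one whole category at a time, numbering each group 1..len(group); the per-item counter state disappears.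
import Mathlib
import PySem

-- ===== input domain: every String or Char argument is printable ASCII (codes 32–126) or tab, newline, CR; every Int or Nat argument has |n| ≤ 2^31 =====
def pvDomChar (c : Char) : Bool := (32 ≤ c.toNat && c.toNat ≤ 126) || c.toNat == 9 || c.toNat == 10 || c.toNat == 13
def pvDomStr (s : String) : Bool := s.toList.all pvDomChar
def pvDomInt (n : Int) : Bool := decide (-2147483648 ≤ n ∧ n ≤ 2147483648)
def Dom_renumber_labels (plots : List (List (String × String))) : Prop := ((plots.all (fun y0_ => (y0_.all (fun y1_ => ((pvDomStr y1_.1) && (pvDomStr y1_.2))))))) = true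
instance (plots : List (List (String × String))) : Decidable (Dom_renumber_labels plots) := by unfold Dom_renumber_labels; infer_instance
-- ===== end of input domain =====

-- B replaces A's interleaved single pass with a running per-category counter by a
-- two-stage group-then-number pass (group indices by category, then label each
-- group 1..len); same return value, and both Pythons mutate the plot dicts in place.

-- ===== PORT A =====
def CATEGORY_LABELS : PySem.Dict String String :=
  PySem.Dict.ofList [("plot", "Plot"), ("road", "Road"), ("boundary", "Boundary")]

-- str.capitalize(): upper-case the first character, lower-case the rest (exact on ASCII)
def pyCapitalize (s : String) : String :=
  match s.toList with
  | [] => ""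
  | c :: rest => String.ofList (PySem.Chars.upperChar c :: PySem.Chars.lower rest)

def renumber_labels (plots : List (List (String × String))) : List (List (String × String)) :=
  (plots.foldl
    (fun (st : PySem.Dict String Int × List (List (String × String))) plot =>
      let cat := (PySem.Dict.mk plot).getD "category" "plot"
      let counters := st.1.insert cat (st.1.getD cat 0 + 1)
      let cat_label := CATEGORY_LABELS.getD cat (pyCapitalize cat)
      let label := cat_label ++ " " ++ PySem.Int.toStr (counters.getD cat 0)
      (counters, st.2 ++ [((PySem.Dict.mk plot).insert "label" label).items]))
    (PySem.Dict.empty, [])).2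

-- ===== PORT B =====
-- stage 1: groups.setdefault(cat, []).append(idx) = modify cat [] (· ++ [idx]);
-- stage 2: for each (cat, idxs) in groups.items, write plots[idx]["label"] = f"{base} {i+1}"
def renumber_labels_alt (plots : List (List (String × String))) : List (List (String × String)) :=
  let groups : PySem.Dict String (List Nat) :=
    plots.zipIdx.foldl
      (fun g q => g.modify ((PySem.Dict.mk q.1).getD "category" "plot") [] (fun xs => xs ++ [q.2]))
      PySem.Dict.empty
  groups.items.foldl
    (fun out ci =>
      let base := CATEGORY_LABELS.getD ci.1 (pyCapitalize ci.1)
      ci.2.zipIdx.foldl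
        (fun out2 q =>
          out2.set q.1 (((PySem.Dict.mk (plots.getD q.1 [])).insert "label"
            (base ++ " " ++ PySem.Int.toStr ((q.2 : Int) + 1))).items))
        out)
    plots

-- ===== PRECONDITION & SPEC =====
def Spec_renumber_labels (plots : List (List (String × String))) (out : List (List (String × String))) : Prop := out = renumber_labels_alt plots
instance (plots : List (List (String × String))) (out : List (List (String × String))) : Decidable (Spec_renumber_labels plots out) := by unfold Spec_renumber_labels; infer_instance

-- ===== CLAIM (what is proved, stated in full; the proofs are below) =====
def Claim_equal_renumber_labels : Prop := ∀ (plots : List (List (String × String))), Dom_renumber_labels plots → Spec_renumber_labels plots (renumber_labels plots)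

-- ===== LEMMAS AND PROOFS =====

-- category of one plot dict
def pvCatOf (plot : List (String × String)) : String :=
  (PySem.Dict.mk plot).getD "category" "plot"

-- the labelled plot dict
def pvBody (plot : List (String × String)) (cat : String) (n : Int) : List (String × String) :=
  ((PySem.Dict.mk plot).insert "label"
    (CATEGORY_LABELS.getD cat (pyCapitalize cat) ++ " " ++ PySem.Int.toStr n)).items

-- the intended value at position k (as an Option, none past the end)
def pvTgt (plots : List (List (String × String))) (k : Nat) : Option (List (String × String)) :=
  (plots[k]?).map (fun p =>
    pvBody p (pvCatOf p) ((((plots.map pvCatOf).take k).count (pvCatOf p) : Int) + 1))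

-- positions (from offset m) whose category is c
def pvPos (c : String) : List String → Nat → List Nat
  | [], _ => []
  | s :: ss, m => if s = c then m :: pvPos c ss (m + 1) else pvPos c ss (m + 1)

-- A-side reference recursion: `pre` = categories of the plots already processed
def pvRef (pre : List String) : List (List (String × String)) → List (List (String × String))
  | [] => []
  | p :: ps => pvBody p (pvCatOf p) ((pre.count (pvCatOf p) : Int) + 1) :: pvRef (pre ++ [pvCatOf p]) ps

theorem pvA_eq_ref (rest : List (List (String × String))) :
    ∀ (pre : List String) (d : PySem.Dict String Int) (acc : List (List (String × String))),
      (∀ c, d.getD c 0 = (pre.count c : Int)) →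
      (rest.foldl
        (fun (st : PySem.Dict String Int × List (List (String × String))) plot =>
          let cat := (PySem.Dict.mk plot).getD "category" "plot"
          let counters := st.1.insert cat (st.1.getD cat 0 + 1)
          let cat_label := CATEGORY_LABELS.getD cat (pyCapitalize cat)
          let label := cat_label ++ " " ++ PySem.Int.toStr (counters.getD cat 0)
          (counters, st.2 ++ [((PySem.Dict.mk plot).insert "label" label).items]))
        (d, acc)).2 = acc ++ pvRef pre rest := by
  induction rest with
  | nil => intro pre d acc h; simp [pvRef]
  | cons p ps ih =>
    intro pre d acc h
    simp only [List.foldl_cons]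
    rw [ih (pre ++ [pvCatOf p]) _ _ ?_]
    · have hn : (d.insert (pvCatOf p) (d.getD (pvCatOf p) 0 + 1)).getD (pvCatOf p) 0
          = (pre.count (pvCatOf p) : Int) + 1 := by
        rw [PySem.Dict.getD_insert_self, h]
      simp only [pvRef, pvBody, pvCatOf] at *
      rw [hn]
      simp
    · intro c
      rw [PySem.Dict.getD_insert]
      split_ifs with hc
      · subst hc; rw [h]; simp [List.count_append, pvCatOf]
      · rw [h]
        have : List.count c [pvCatOf p] = 0 := by
          simp [List.count_singleton]
          exact fun hh => absurd hh.symm hc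
        simp [List.count_append, this]

-- A-side, positional form
theorem pvRef_get (rest : List (List (String × String))) :
    ∀ (pre : List String) (j : Nat),
      (pvRef pre rest)[j]? = (rest[j]?).map (fun p =>
        pvBody p (pvCatOf p)
          (((pre ++ (rest.map pvCatOf).take j).count (pvCatOf p) : Int) + 1)) := by
  induction rest with
  | nil => intro pre j; simp [pvRef]
  | cons p ps ih =>
    intro pre j
    cases j with
    | zero => simp [pvRef]
    | succ j =>
      simp only [pvRef, List.getElem?_cons_succ, List.map_cons, List.take_succ_cons]
      rw [ih (pre ++ [pvCatOf p]) j]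
      simp [List.append_assoc]

theorem pvA_get (plots : List (List (String × String))) (k : Nat) :
    (renumber_labels plots)[k]? = pvTgt plots k := by
  unfold renumber_labels
  rw [pvA_eq_ref plots [] PySem.Dict.empty [] (by intro c; simp [PySem.Dict.getD_empty])]
  rw [List.nil_append, pvRef_get plots [] k]
  simp [pvTgt]

-- stage-1 grouping: the index list stored for category c is pvPos c cats 0
theorem pvGroups_filter (c : String) (plots : List (List (String × String))) :
    ∀ (m : Nat),
      (List.map (fun x => x.2)
        (List.filter (fun p => p.1 == c)
          ((plots.zipIdx m).map (fun q => (pvCatOf q.1, q.2))))) = pvPos c (plots.map pvCatOf) m := by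
  induction plots with
  | nil => intro m; simp [pvPos]
  | cons p ps ih =>
    intro m
    rw [List.zipIdx_cons]
    simp only [List.map_cons, List.filter_cons, List.map_cons, pvPos]
    by_cases hc : pvCatOf p = c
    · simp [hc, ih (m + 1)]
    · simp [hc, ih (m + 1)]

theorem pvGroups_getD (plots : List (List (String × String))) (c : String) :
    (plots.zipIdx.foldl
      (fun g q => g.modify ((PySem.Dict.mk q.1).getD "category" "plot") [] (fun xs => xs ++ [q.2]))
      PySem.Dict.empty).getD c [] = pvPos c (plots.map pvCatOf) 0 := by
  have h := PySem.Dict.getD_foldl_modify_append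
    ((plots.zipIdx 0).map (fun q => (pvCatOf q.1, q.2))) (PySem.Dict.empty) c
  rw [List.foldl_map] at h
  simp only [pvCatOf] at h
  rw [h]
  rw [PySem.Dict.getD_empty, List.nil_append]
  exact pvGroups_filter c plots 0

-- set preserved through the inner writing fold: lengths
theorem pvInner_length {X : Type} (l : List (Nat × Nat)) (f : Nat → Nat → X) :
    ∀ (out : List X),
      (l.foldl (fun o q => o.set q.1 (f q.1 q.2)) out).length = out.length := by
  induction l with
  | nil => intro out; rfl
  | cons q qs ih => intro out; rw [List.foldl_cons, ih]; exact List.length_set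

-- the inner fold writes f k (t + rank) exactly at the positions of category c
theorem pvInner {X : Type} (cs : List String) (c : String) :
    ∀ (m t : Nat) (out : List X) (f : Nat → Nat → X),
      m + cs.length ≤ out.length →
      ∀ k, (((pvPos c cs m).zipIdx t).foldl (fun o q => o.set q.1 (f q.1 q.2)) out)[k]? =
        if m ≤ k ∧ cs[k - m]? = some c
        then some (f k (t + (cs.take (k - m)).count c))
        else out[k]? := by
  induction cs with
  | nil =>
    intro m t out f _ k
    simp [pvPos]
  | cons s ss ih =>
    intro m t out f hlen k
    by_cases hs : s = c
    · subst hs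
      simp only [pvPos, if_true, List.zipIdx_cons, List.foldl_cons]
      rw [ih (m + 1) (t + 1) (out.set m (f m t)) f
        (by rw [List.length_set]; simp at hlen; omega)]
      by_cases h1 : m + 1 ≤ k ∧ ss[k - (m + 1)]? = some s
      · rw [if_pos h1]
        have h2 : m ≤ k ∧ (s :: ss)[k - m]? = some s := by
          refine ⟨by omega, ?_⟩
          have hk : k - m = (k - (m + 1)) + 1 := by omega
          rw [hk, List.getElem?_cons_succ]
          exact h1.2
        rw [if_pos h2]
        have hk : k - m = (k - (m + 1)) + 1 := by omega
        rw [hk, List.take_succ_cons, List.count_cons_self]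
        congr 2
        omega
      · rw [if_neg h1]
        by_cases hk : k = m
        · subst hk
          rw [List.getElem?_set_self (by simp at hlen; omega)]
          rw [if_pos ⟨le_refl _, by simp⟩]
          simp
        · rw [List.getElem?_set_ne (fun h => hk h.symm)]
          have hcond : ¬ (m ≤ k ∧ (s :: ss)[k - m]? = some s) := by
            rintro ⟨hmk, hget⟩
            have hm1 : m + 1 ≤ k := by omega
            have hx : k - m = (k - (m + 1)) + 1 := by omega
            rw [hx, List.getElem?_cons_succ] at hget
            exact h1 ⟨hm1, hget⟩
          rw [if_neg hcond]
    · simp only [pvPos, if_neg hs]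
      rw [ih (m + 1) t out f (by simp at hlen ⊢; omega)]
      by_cases h1 : m + 1 ≤ k ∧ ss[k - (m + 1)]? = some c
      · rw [if_pos h1]
        have h2 : m ≤ k ∧ (s :: ss)[k - m]? = some c := by
          refine ⟨by omega, ?_⟩
          have hk : k - m = (k - (m + 1)) + 1 := by omega
          rw [hk, List.getElem?_cons_succ]
          exact h1.2
        rw [if_pos h2]
        have hk : k - m = (k - (m + 1)) + 1 := by omega
        rw [hk, List.take_succ_cons, List.count_cons_of_ne hs]
      · have hcond : ¬ (m ≤ k ∧ (s :: ss)[k - m]? = some c) := by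
          rintro ⟨hmk, hget⟩
          by_cases hk : k = m
          · subst hk
            simp at hget
            exact hs hget
          · have hm1 : m + 1 ≤ k := by omega
            have hx : k - m = (k - (m + 1)) + 1 := by omega
            rw [hx, List.getElem?_cons_succ] at hget
            exact h1 ⟨hm1, hget⟩
        rw [if_neg h1, if_neg hcond]

-- the stage-2 body, named for the outer induction
def pvWrite (plots : List (List (String × String))) (c : String) (idx i : Nat) :
    List (String × String) :=
  ((PySem.Dict.mk (plots.getD idx [])).insert "label"
    (CATEGORY_LABELS.getD c (pyCapitalize c) ++ " " ++ PySem.Int.toStr ((i : Int) + 1))).items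

theorem pvWrite_tgt (plots : List (List (String × String))) (k : Nat) (c : String)
    (h : (plots.map pvCatOf)[k]? = some c) :
    some (pvWrite plots c k (((plots.map pvCatOf).take k).count c)) = pvTgt plots k := by
  have hk : k < plots.length := by
    have := List.getElem?_eq_some_iff.mp h
    simpa using this.1
  rw [List.getElem?_map] at h
  obtain ⟨p, hp, hc⟩ := Option.map_eq_some_iff.mp h
  unfold pvTgt pvWrite pvBody
  rw [hp]
  simp only [Option.map_some]
  rw [List.getD_eq_getElem?_getD, hp, hc]
  rfl

-- stage-2 outer fold, pointwise
theorem pvOuter (plots : List (List (String × String))) :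
    ∀ (L : List (String × List Nat)) (out : List (List (String × String))),
      (∀ p ∈ L, p.2 = pvPos p.1 (plots.map pvCatOf) 0) →
      plots.length ≤ out.length →
      ∀ k, ((L.foldl
          (fun out ci =>
            ci.2.zipIdx.foldl
              (fun out2 q =>
                out2.set q.1 (((PySem.Dict.mk (plots.getD q.1 [])).insert "label"
                  (CATEGORY_LABELS.getD ci.1 (pyCapitalize ci.1) ++ " " ++
                    PySem.Int.toStr ((q.2 : Int) + 1))).items))
              out)
          out)[k]?) =
        if ∃ p ∈ L, (plots.map pvCatOf)[k]? = some p.1 then pvTgt plots k else out[k]? := by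
  intro L
  induction L with
  | nil =>
    intro out _ _ k
    simp
  | cons ci L' ih =>
    intro out hL hlen k
    rw [List.foldl_cons]
    have hci : ci.2 = pvPos ci.1 (plots.map pvCatOf) 0 := hL ci (List.mem_cons_self)
    have hinner := pvInner (plots.map pvCatOf) ci.1 0 0 out
      (fun idx i => pvWrite plots ci.1 idx i) (by simp; omega)
    unfold pvWrite at hinner
    beta_reduce at hinner
    have hl := pvInner_length ((pvPos ci.1 (plots.map pvCatOf) 0).zipIdx 0)
      (fun idx i => ((PySem.Dict.mk (plots.getD idx [])).insert "label"
        (CATEGORY_LABELS.getD ci.1 (pyCapitalize ci.1) ++ " " ++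
          PySem.Int.toStr ((i : Int) + 1))).items) out
    rw [hci]
    have hres := ih (ci.2.zipIdx.foldl
        (fun out2 q =>
          out2.set q.1 (((PySem.Dict.mk (plots.getD q.1 [])).insert "label"
            (CATEGORY_LABELS.getD ci.1 (pyCapitalize ci.1) ++ " " ++
              PySem.Int.toStr ((q.2 : Int) + 1))).items))
        out)
      (fun p hp => hL p (List.mem_cons_of_mem _ hp))
      (by rw [hci]; exact hlen.trans (le_of_eq hl.symm))
      k
    rw [hci] at hres
    rw [hres]
    by_cases h2 : ∃ p ∈ L', (plots.map pvCatOf)[k]? = some p.1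
    · rw [if_pos h2, if_pos ⟨_, List.mem_cons_of_mem _ h2.choose_spec.1, h2.choose_spec.2⟩]
    · rw [if_neg h2]
      rw [hinner k]
      by_cases hc : (plots.map pvCatOf)[k]? = some ci.1
      · rw [if_pos ⟨Nat.zero_le _, by simpa using hc⟩,
            if_pos ⟨ci, List.mem_cons_self, hc⟩]
        simp only [Nat.sub_zero, Nat.zero_add]
        exact pvWrite_tgt plots k ci.1 hc
      · rw [if_neg (by simpa using hc), if_neg ?_]
        rintro ⟨p, hp, hmem⟩
        rcases List.mem_cons.mp hp with h | h
        · exact hc (h ▸ hmem)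
        · exact h2 ⟨p, h, hmem⟩

theorem pvB_get (plots : List (List (String × String))) (k : Nat) :
    (renumber_labels_alt plots)[k]? = pvTgt plots k := by
  unfold renumber_labels_alt
  set groups := plots.zipIdx.foldl
      (fun g q => g.modify ((PySem.Dict.mk q.1).getD "category" "plot") [] (fun xs => xs ++ [q.2]))
      PySem.Dict.empty with hg
  have hnodup : groups.keys.Nodup := by
    rw [hg]
    exact PySem.Dict.nodup_keys_foldl_modify_key plots.zipIdx
      (fun q => (PySem.Dict.mk q.1).getD "category" "plot") [] (fun _ q => fun xs => xs ++ [q.2])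
      PySem.Dict.empty (by rw [PySem.Dict.keys_empty]; exact List.nodup_nil)
  have hitems : ∀ p ∈ groups.items, p.2 = pvPos p.1 (plots.map pvCatOf) 0 := by
    rintro ⟨c, l⟩ hp
    have := PySem.Dict.getD_of_mem_items groups hp hnodup []
    rw [← this, hg, pvGroups_getD]
  rw [pvOuter plots groups.items plots hitems (le_refl _) k]
  by_cases hk : k < plots.length
  · rw [if_pos ?_]
    have hc : (plots.map pvCatOf)[k]? = some (pvCatOf plots[k]) := by
      simp [List.getElem?_map, List.getElem?_eq_getElem hk]
    have hkeys : pvCatOf plots[k] ∈ groups.keys := by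
      have hkf := PySem.Dict.keys_foldl_modify_key plots.zipIdx
        (fun q => (PySem.Dict.mk q.1).getD "category" "plot") []
        (fun _ q => fun xs => xs ++ [q.2]) PySem.Dict.empty
      beta_reduce at hkf
      rw [hg, hkf, PySem.Dict.keys_empty]
      have hupd : PySem.Set.update ([] : List String)
          (plots.zipIdx.map fun q => (PySem.Dict.mk q.1).getD "category" "plot")
          = PySem.Set.ofList (plots.zipIdx.map fun q => (PySem.Dict.mk q.1).getD "category" "plot") := by
        rw [PySem.Set.ofList_eq_foldl]
        simp [PySem.Set.update]
      rw [hupd, PySem.Set.mem_ofList]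
      refine List.mem_map.mpr ⟨(plots[k], k), ?_, rfl⟩
      exact List.mem_iff_getElem.mpr ⟨k, by simpa using hk, by simp⟩
    have : pvCatOf plots[k] ∈ groups.items.map Prod.fst := hkeys
    obtain ⟨p, hp, hfst⟩ := List.mem_map.mp this
    exact ⟨p, hp, by rw [hc, hfst]⟩
  · rw [if_neg ?_, List.getElem?_eq_none (by omega)]
    · unfold pvTgt
      rw [List.getElem?_eq_none (by omega)]
      rfl
    · rintro ⟨p, _, hmem⟩
      rw [List.getElem?_eq_none (by simp; omega)] at hmem
      simp at hmem

-- ===== VERDICT (by name: the statement is the Claim_ definition above) =====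
theorem renumber_labels_spec : Claim_equal_renumber_labels := by
  intro plots _
  show renumber_labels plots = renumber_labels_alt plots
  apply List.ext_getElem?
  intro k
  rw [pvA_get, pvB_get]
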